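/-
  jsmn_s.bin: `jsmn_parse`, `case '}': case ']':` (1003B7H – 100433H, 1005F2H – 10060EH: 43 instructions, one loop, head 1003FDH).
  With parent links: `toknext < 1` → JSMN_ERROR_INVAL; from `token = &tokens[toknext - 1]` WALK UP THE PARENT LINKS:
    the token is open → its type must be the bracket's (else JSMN_ERROR_INVAL); `token->end = pos + 1`, `toksuper = token->parent`; done;
    `token->parent == -1` → (type mismatch or `toksuper == -1` → JSMN_ERROR_INVAL) else done;
    `token = &tokens[token->parent]`.
  = `Jsmn.closeBracket` → `closeLinks`. The loop is proved with `Reach.loopOn`; its index is `closeLinks`' own fuel. That every `tokens[idx]`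
  read is inside the array, and that the walk goes down, comes from `Frame.inv` (`TokInv.links`: for i < toknext, -1 ≤ parent(i) < i).
-/
import Prog.Jsmn.S.ScanLemmas

namespace X86
namespace J6
namespace S
open X86.User (CodeAt RegsKept Span FlagsOK Layout toNat_add_ofNat toNat_ofNat_lt' add_ofNat_add)
open Jsmn JsmnSBytes

set_option maxRecDepth 100000
set_option maxHeartbeats 4000000
set_option linter.unusedSimpArgs false
set_option linter.unusedVariables false

/-! ### The model side -/

/-- The bracket's token type: `}` closes an object (1), `]` an array (2). -/
def cloType (ch : UInt8) : Nat := if ch == 0x7d then JSMN_OBJECT else JSMN_ARRAY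

theorem body_close (js : List UInt8) (fuel n : Nat) (s : St) (ch : UInt8) (hch : ch = 0x7d ∨ ch = 0x5d) :
    body Config.strictLinks js fuel n s ch = closeBracket Config.strictLinks ch s := by
  rcases hch with rfl | rfl <;> simp [body]

theorem closeBracket_none {s : St} (ch : UInt8) (hts : s.toks = none) : closeBracket Config.strictLinks ch s = some (.next s) := by
  simp [closeBracket, hts]

/-- No token allocated yet: JSMN_ERROR_INVAL. -/
theorem closeBracket_zero {s : St} {ts : Tokens} (ch : UInt8) (hts : s.toks = some ts) (h0 : s.p.toknext = 0) :
    closeBracket Config.strictLinks ch s = some (.ret JSMN_ERROR_INVAL s) := by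
  simp [closeBracket, hts, links_strictLinks, h0]

/-- Otherwise: the walk up the links from `tokens[toknext - 1]`, with `toknext + 1` units of fuel. -/
theorem closeBracket_links {s : St} {ts : Tokens} (ch : UInt8) (hts : s.toks = some ts) (j : Nat) (hj : s.p.toknext = j + 1) :
    closeBracket Config.strictLinks ch s = closeLinks (cloType ch) s ts (j + 2) (j : Int) := by
  simp [closeBracket, hts, links_strictLinks, hj, cloType]

/-- The state after `token->end = pos + 1 ; toksuper = token->parent` for `token = &tokens[idx]`. -/
def cloRes (s : St) (ts : Tokens) (idx : Nat) : St :=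
  { s with p := { s.p with toksuper := (ts.getD idx default).parent },
           toks := some (ts.set idx { ts.getD idx default with «end» := i32 (s.p.pos + 1) }) }

theorem closeLinks_open_mismatch {s : St} {ts : Tokens} {ty k idx : Nat} (ho : (ts.getD idx default).isOpen = true)
    (hne : (ts.getD idx default).type ≠ ty) : closeLinks ty s ts (k + 1) (idx : Int) = some (.ret JSMN_ERROR_INVAL s) := by
  simp only [closeLinks, tokAt_nat, ho, if_true]
  rw [if_pos (by simpa using hne)]

theorem closeLinks_open_match {s : St} {ts : Tokens} {ty k idx : Nat} (ho : (ts.getD idx default).isOpen = true)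
    (heq : (ts.getD idx default).type = ty) : closeLinks ty s ts (k + 1) (idx : Int) = some (.next (cloRes s ts idx)) := by
  simp only [closeLinks, tokAt_nat, tokUpd_nat, ho, if_true]
  rw [if_neg (by simpa using heq)]
  rfl

theorem closeLinks_root_bad {s : St} {ts : Tokens} {ty k idx : Nat} (ho : ¬ (ts.getD idx default).isOpen = true)
    (hp : (ts.getD idx default).parent = -1) (hbad : (ts.getD idx default).type ≠ ty ∨ s.p.toksuper = -1) :
    closeLinks ty s ts (k + 1) (idx : Int) = some (.ret JSMN_ERROR_INVAL s) := by
  simp only [closeLinks, tokAt_nat]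
  rw [if_neg ho, if_pos (by simpa using hp), if_pos (by simpa using hbad)]

theorem closeLinks_root_ok {s : St} {ts : Tokens} {ty k idx : Nat} (ho : ¬ (ts.getD idx default).isOpen = true)
    (hp : (ts.getD idx default).parent = -1) (heq : (ts.getD idx default).type = ty) (hsup : s.p.toksuper ≠ -1) :
    closeLinks ty s ts (k + 1) (idx : Int) = some (.next s) := by
  simp only [closeLinks, tokAt_nat]
  rw [if_neg ho, if_pos (by simpa using hp), if_neg (by rw [heq]; simpa using hsup)]

theorem closeLinks_up {s : St} {ts : Tokens} {ty k idx : Nat} (ho : ¬ (ts.getD idx default).isOpen = true)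
    (hp : (ts.getD idx default).parent ≠ -1) :
    closeLinks ty s ts (k + 1) (idx : Int) = closeLinks ty s ts k (ts.getD idx default).parent := by
  simp only [closeLinks, tokAt_nat]
  rw [if_neg ho, if_neg (by simpa using hp)]

/-! ### The loop (head 1003FDH) -/

/-- The invariant at the head of the walk: `rdx = &tokens[idx]`, the bracket's type in ecx, pos in esi, `idx` an allocated token, and the model's
walk from `idx` with `k` units of fuel gives the case's answer `step`. -/
structure CloInv (c : PCtx) (n : User.Layout) (v0 : User.State) (s : St) (ts : Tokens) (ty : Nat) (step : Step) (idx k : Nat) (v : User.State) : Prop where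
  rip : v.rip = 0x1003fd
  frame : Frame c n v0 v s
  rdx : v.reg .rdx = c.tb + UInt64.ofNat (20 * idx)
  rcx : v.reg .rcx = UInt64.ofNat ty
  rsi : v.reg .rsi = UInt64.ofNat s.p.pos
  ilt : idx < s.p.toknext
  run : closeLinks ty s ts k (idx : Int) = some step

/-- One trip round the walk: the case is over, or up one link (one unit of fuel less). -/
theorem clo_body {n : User.Layout} {c : PCtx} {v0 v : User.State} {s : St} {ts : Tokens} {ty : Nat} {step : Step} (hts : s.toks = some ts)
    (hty : ty < 4294967296) (hsafe : ∀ s', step = .next s' → Inv Config.strictLinks s'.p s'.toks c.numTokens)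
    (k : Nat) (hi : ∃ idx, CloInv c n v0 s ts ty step idx k v) :
    Reach n v (fun v' => Outcome c n v0 v' (some step) ∨ ∃ k', k' < k ∧ ∃ idx', CloInv c n v0 s ts ty step idx' k' v') := by
  obtain ⟨idx, hi⟩ := hi
  obtain ⟨p, toks, count⟩ := s
  dsimp only at hts
  subst hts
  have hf := hi.frame
  have hfc := hf.core
  have htl := hfc.tlen_some
  have hcode := hfc.code
  have henv := hfc.entry.pre.env
  have hcall := hfc.entry.pre.call
  have hW := hfc.entry.pre.toksW
  v3_open hi henv hcall hW
  j6_bin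
  obtain ⟨htb, hlen, htoks⟩ := hi_frame_core_toksArg
  simp only [PCtx.tlen, htl, dataWins] at *
  have hR := hfc.entry.pre.env.toksR.resolve_left htb
  v3_open hR
  j6_bin
  have htinv := hf.inv.toks ts rfl
  have hsmall := htinv.small
  have htn : p.toknext ≤ c.numTokens := htinv.toknext
  have hlink := htinv.links rfl idx hi_ilt
  rcases k with _ | k
  · exact absurd hi_run (by simp [closeLinks])
  · have ht := htoks.getD idx (by omega)
    rw [tokAddr20] at ht
    have hty0 := ht.type
    have hty32 : (ts.getD idx default).type < 2 ^ 32 := hty0 ▸ User.Mem.readLE4_lt _ _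
    obtain ⟨hrs, -, -⟩ := ht.start
    obtain ⟨hre, -, -⟩ := ht.«end»
    obtain ⟨hrp, hp1, hp2⟩ := ht.parent rfl
    obtain ⟨hraw, hs1, hs2⟩ := hi_frame_core_parser_toksuper
    have hopen := isOpen_raw ht.start ht.«end»
    rw [hrs, hre] at hopen
    have hu1 := u32_lt (ts.getD idx default).start
    have hu2 := u32_lt (ts.getD idx default).«end»
    have hu3 := u32_lt (ts.getD idx default).parent
    have hu4 := u32_lt p.toksuper
    have hpos1 : u32 ((p.pos : Int) + 1) = (p.pos + 1) % 4294967296 := by unfold u32; omega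
    have e1 : ((233 : Nat) == 235) = false := by decide
    have e2 : ((233 : UInt8) == 235) = false := by decide
    have e3 : ((233 : UInt64) == 235) = false := by decide
    have hpm : (ts.getD idx default).parent = -1 ↔ u32 (ts.getD idx default).parent = 4294967295 := by
      have := neg1_raw (ht.parent rfl); rwa [hrp] at this
    have hsm : p.toksuper = -1 ↔ u32 p.toksuper = 4294967295 := by
      have := neg1_raw hfc.parser.toksuper; rwa [hraw] at this
    -- what the model says in each of the five situations
    have hRetRoot : ¬ (ts.getD idx default).isOpen = true → (ts.getD idx default).parent = -1 →
        ((ts.getD idx default).type ≠ ty ∨ p.toksuper = -1) → step = .ret JSMN_ERROR_INVAL ⟨p, some ts, count⟩ := by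
      intro ho hp hbad
      rw [closeLinks_root_bad ho hp hbad] at hi_run; exact (Option.some.inj hi_run).symm
    have hNextRoot : ¬ (ts.getD idx default).isOpen = true → (ts.getD idx default).parent = -1 →
        (ts.getD idx default).type = ty → p.toksuper ≠ -1 → step = .next ⟨p, some ts, count⟩ := by
      intro ho hp heq hsup
      rw [closeLinks_root_ok ho hp heq hsup] at hi_run; exact (Option.some.inj hi_run).symm
    have hUp : ¬ (ts.getD idx default).isOpen = true → (ts.getD idx default).parent ≠ -1 →
        ∃ k' : Nat, k' < idx ∧ u32 (ts.getD idx default).parent = k' ∧ closeLinks ty ⟨p, some ts, count⟩ ts k (k' : Int) = some step := by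
      intro ho hp
      obtain ⟨k', hk'⟩ : ∃ k' : Nat, (ts.getD idx default).parent = k' := ⟨(ts.getD idx default).parent.toNat, by omega⟩
      refine ⟨k', by omega, by rw [hk']; exact u32_nat k' (by omega), ?_⟩
      rw [← hk', ← closeLinks_up ho hp]; exact hi_run
    have hRetOpen : (ts.getD idx default).isOpen = true → (ts.getD idx default).type ≠ ty →
        step = .ret JSMN_ERROR_INVAL ⟨p, some ts, count⟩ := by
      intro ho hne
      rw [closeLinks_open_mismatch ho hne] at hi_run; exact (Option.some.inj hi_run).symm
    have hNextOpen : (ts.getD idx default).isOpen = true → (ts.getD idx default).type = ty →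
        step = .next (cloRes ⟨p, some ts, count⟩ ts idx) := by
      intro ho heq
      rw [closeLinks_open_match ho heq] at hi_run; exact (Option.some.inj hi_run).symm
    v3_walk hcode hcall.fetch [e1, e2, e3] until [0x100486, 0x100325, 0x1003fd]
    · -- start == -1 (not open), no parent, type mismatch: JSMN_ERROR_INVAL
      have hno : ¬ (ts.getD idx default).isOpen = true := by rw [hopen]; intro h; apply h.1; v3_omega
      have hst := hRetRoot hno (by rw [hpm]; v3_omega) (Or.inl (by v3_omega))
      subst hst
      refine Reach.done (Or.inl ⟨by simp, hfc.of_kept (by simp) (by v3_kept), ?_⟩)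
      v3_regnorm; rfl
    · -- start == -1, no parent, the type fits, there is a superior token: done
      have hno : ¬ (ts.getD idx default).isOpen = true := by rw [hopen]; intro h; apply h.1; v3_omega
      have hst := hNextRoot hno (by rw [hpm]; v3_omega) (by v3_omega) (by rw [ne_eq, hsm]; v3_omega)
      subst hst
      exact Reach.done (Or.inl ⟨by simp, hf.of_kept (by simp) (by v3_kept)⟩)
    · -- start == -1, no parent, the type fits, toksuper == -1: JSMN_ERROR_INVAL
      have hno : ¬ (ts.getD idx default).isOpen = true := by rw [hopen]; intro h; apply h.1; v3_omega
      have hst := hRetRoot hno (by rw [hpm]; v3_omega) (Or.inr (by rw [hsm]; v3_omega))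
      subst hst
      refine Reach.done (Or.inl ⟨by simp, hfc.of_kept (by simp) (by v3_kept), ?_⟩)
      v3_regnorm; rfl
    · -- start == -1, a parent: up one link
      have hno : ¬ (ts.getD idx default).isOpen = true := by rw [hopen]; intro h; apply h.1; v3_omega
      obtain ⟨k', hk'lt, hu, hrun'⟩ := hUp hno (by rw [ne_eq, hpm]; v3_omega)
      rw [hu, Word.sext32_ofNat_of_lt k' (by omega), lea20_ofNat k' (by omega)]
      exact Reach.done (Or.inr ⟨k, by omega, k', by simp, hf.of_kept (by simp) (by v3_kept), by v3_regnorm, by v3_regnorm; exact hi_rcx,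
        by v3_regnorm; exact hi_rsi, by dsimp only; omega, hrun'⟩)
    · -- end != -1 (not open), no parent, type mismatch: JSMN_ERROR_INVAL
      have hno : ¬ (ts.getD idx default).isOpen = true := by rw [hopen]; intro h; apply hbr_100407; rw [h.2]; rfl
      have hst := hRetRoot hno (by rw [hpm]; v3_omega) (Or.inl (by v3_omega))
      subst hst
      refine Reach.done (Or.inl ⟨by simp, hfc.of_kept (by simp) (by v3_kept), ?_⟩)
      v3_regnorm; rfl
    · -- end != -1, no parent, the type fits, there is a superior token: done
      have hno : ¬ (ts.getD idx default).isOpen = true := by rw [hopen]; intro h; apply hbr_100407; rw [h.2]; rfl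
      have hst := hNextRoot hno (by rw [hpm]; v3_omega) (by v3_omega) (by rw [ne_eq, hsm]; v3_omega)
      subst hst
      exact Reach.done (Or.inl ⟨by simp, hf.of_kept (by simp) (by v3_kept)⟩)
    · -- end != -1, no parent, the type fits, toksuper == -1: JSMN_ERROR_INVAL
      have hno : ¬ (ts.getD idx default).isOpen = true := by rw [hopen]; intro h; apply hbr_100407; rw [h.2]; rfl
      have hst := hRetRoot hno (by rw [hpm]; v3_omega) (Or.inr (by rw [hsm]; v3_omega))
      subst hst
      refine Reach.done (Or.inl ⟨by simp, hfc.of_kept (by simp) (by v3_kept), ?_⟩)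
      v3_regnorm; rfl
    · -- end != -1, a parent: up one link
      have hno : ¬ (ts.getD idx default).isOpen = true := by rw [hopen]; intro h; apply hbr_100407; rw [h.2]; rfl
      obtain ⟨k', hk'lt, hu, hrun'⟩ := hUp hno (by rw [ne_eq, hpm]; v3_omega)
      rw [hu, Word.sext32_ofNat_of_lt k' (by omega), lea20_ofNat k' (by omega)]
      exact Reach.done (Or.inr ⟨k, by omega, k', by simp, hf.of_kept (by simp) (by v3_kept), by v3_regnorm, by v3_regnorm; exact hi_rcx,
        by v3_regnorm; exact hi_rsi, by dsimp only; omega, hrun'⟩)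
    · -- the open token is of the other type: JSMN_ERROR_INVAL
      have hyes : (ts.getD idx default).isOpen = true := by rw [hopen]; constructor <;> v3_omega
      have hst := hRetOpen hyes (by v3_omega)
      subst hst
      refine Reach.done (Or.inl ⟨by simp, hfc.of_kept (by simp) (by v3_kept), ?_⟩)
      v3_regnorm; rfl
    · -- the open token, of the right type: end = pos + 1, toksuper = its parent
      have hyes : (ts.getD idx default).isOpen = true := by rw [hopen]; constructor <;> v3_omega
      have hst := hNextOpen hyes (by v3_omega)
      subst hst
      have hinv' := hsafe _ rfl
      have hil : idx < ts.length := by omega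
      refine Reach.done (Or.inl ⟨by simp, ⟨?_, by v3_regnorm; exact hi_frame_r12, ⟨hi_frame_cnt_1, hi_frame_cnt_2⟩, hinv'⟩⟩)
      dsimp only [cloRes]
      refine hfc.store_token_super (b := c.tb + UInt64.ofNat (20 * idx) + 8) (by v3_memnorm; rfl) (by v3_kept) (by v3_omega)
        ⟨by v3_frame hi_frame_core_parser_pos, by v3_frame hi_frame_core_parser_toknext, holds32_read (by v3_read) ⟨?_, hp1, hp2⟩⟩
        (by rw [List.length_set]; exact hlen) ?_
      · v3_omega
      · v3_memnorm
        refine TokensAt.update htoks hil (by rw [tokSize_strictLinks, hlen]; v3_omega) (by rw [tokSize_strictLinks]; v3_eqon)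
          (by rw [tokSize_strictLinks, hlen]; v3_eqon) ?_
        rw [tokAddr20]
        have hst := ht.start
        have hsz := ht.size
        have hpar := ht.parent rfl
        refine ⟨by v3_frame hty0, by v3_frame hst, holds32_read (raw := u32 ((p.pos : Int) + 1)) (by rw [hpos1]; v3_read) (holds32_i32 _),
          by v3_frame hsz, fun _ => by v3_frame hpar⟩

/-! ### The entry of the case, and the loop -/

/-- From the head of the walk to the end of the case. -/
theorem close_loop {n : User.Layout} {c : PCtx} {v0 v : User.State} {s : St} {ts : Tokens} {ty : Nat} {step : Step} (hts : s.toks = some ts)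
    (hty : ty < 4294967296) (hsafe : ∀ s', step = .next s' → Inv Config.strictLinks s'.p s'.toks c.numTokens)
    (idx k : Nat) (hi : CloInv c n v0 s ts ty step idx k v) : Reach n v (fun v' => Outcome c n v0 v' (some step)) :=
  Reach.loopOn (Inv := fun k v => ∃ idx, CloInv c n v0 s ts ty step idx k v) (fun k v hi => clo_body hts hty hsafe k hi) k v ⟨idx, hi⟩

/-- **1003B7H → 100486H / 100325H: `case '}': case ']':` computes `Jsmn.closeBracket`.** -/
theorem close_reach (sf : SafeFacts binS.cfg) {n : User.Layout} {c : PCtx} {v0 v : User.State} {s : St} {ch : UInt8} {fuel : Nat} (hch : ch = 0x7d ∨ ch = 0x5d)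
    (hc : AtCase c n v0 v s 0x1003b7 ch) (hsome : body Config.strictLinks c.js fuel c.numTokens s ch ≠ none) :
    Reach n v (fun v' => Outcome c n v0 v' (body Config.strictLinks c.js fuel c.numTokens s ch)) := by
  have hf := hc.frame
  have hsafe := (sf.body c.js fuel c.numTokens s ch hf.inv hf.cnt).1
  rw [binS_cfg, body_close _ _ _ _ _ hch] at hsafe
  rw [body_close _ _ _ _ _ hch] at hsome ⊢
  obtain ⟨p, toks, count⟩ := s
  have hfc := hf.core
  have hcode := hfc.code
  have henv := hfc.entry.pre.env
  have hcall := hfc.entry.pre.call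
  have hrip := hc.rip
  have hrbx := hc.rbx (Or.inr rfl)
  have hrsi := hc.rsi rfl
  have hW := hfc.entry.pre.toksW
  v3_open hf henv hcall hW
  j6_bin
  cases toks with
  | none =>
    -- counting mode: nothing to do
    have htb : c.tb = 0 := hf_core_toksArg
    rw [closeBracket_none ch rfl]
    v3_walk hcode hcall.fetch [] until [0x100486]
    exact Reach.done ⟨by simp, hf.of_kept (by simp) (by v3_kept)⟩
  | some ts =>
    have htl := hfc.tlen_some
    obtain ⟨htb, hlen, htoks⟩ := hf_core_toksArg
    simp only [PCtx.tlen, htl, dataWins] at *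
    have hR := hfc.entry.pre.env.toksR.resolve_left htb
    v3_open hR
    j6_bin
    have htinv := hf.inv.toks ts rfl
    have hsmall := htinv.small
    have htn : p.toknext ≤ c.numTokens := htinv.toknext
    have e1 : ((233 : Nat) == 235) = false := by decide
    have e2 : ((233 : UInt8) == 235) = false := by decide
    have e3 : ((233 : UInt64) == 235) = false := by decide
    rcases hj : p.toknext with _ | j
    · -- no token allocated yet: JSMN_ERROR_INVAL
      rw [hj] at hf_core_parser_toknext
      rw [closeBracket_zero ch rfl hj]
      rcases hch with rfl | rfl
      · have hrbx' : v.reg .rbx = 0x7d := hrbx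
        v3_walk hcode hcall.fetch [e1, e2, e3] until [0x100325]
        refine Reach.done ⟨by simp, hfc.of_kept (by simp) (by v3_kept), ?_⟩
        v3_regnorm; rfl
      · have hrbx' : v.reg .rbx = 0x5d := hrbx
        v3_walk hcode hcall.fetch [e1, e2, e3] until [0x100325]
        refine Reach.done ⟨by simp, hfc.of_kept (by simp) (by v3_kept), ?_⟩
        v3_regnorm; rfl
    · rw [hj] at hf_core_parser_toknext
      rw [closeBracket_links ch rfl j hj] at hsafe hsome ⊢
      obtain ⟨step, hstep⟩ := Option.ne_none_iff_exists'.mp hsome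
      rw [hstep] at hsafe ⊢
      have hsafe' : ∀ s', step = .next s' → Inv Config.strictLinks s'.p s'.toks c.numTokens :=
        fun s' h => (hsafe s' (by rw [h])).1
      have hdec : Word.low .w32 (UInt64.ofNat (j + 1) - 1) = UInt64.ofNat j := by word_omega
      have hlea := lea20_ofNat j (by omega)
      rcases hch with rfl | rfl
      · -- `}`: an object
        have hrbx' : v.reg .rbx = 0x7d := hrbx
        v3_walk hcode hcall.fetch [e1, e2, e3, hdec, hlea] until [0x1003fd]
        exact close_loop (ty := cloType 0x7d) rfl (by decide) hsafe' j (j + 2)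
          ⟨by simp, hf.of_kept (by simp) (by v3_kept), by v3_regnorm, by v3_regnorm; rfl, by v3_regnorm; exact hrsi, by dsimp only; omega, hstep⟩
      · -- `]`: an array
        have hrbx' : v.reg .rbx = 0x5d := hrbx
        v3_walk hcode hcall.fetch [e1, e2, e3, hdec, hlea] until [0x1003fd]
        exact close_loop (ty := cloType 0x5d) rfl (by decide) hsafe' j (j + 2)
          ⟨by simp, hf.of_kept (by simp) (by v3_kept), by v3_regnorm, by v3_regnorm; rfl, by v3_regnorm; exact hrsi, by dsimp only; omega, hstep⟩

/-- `case '}': case ']':`, as the region statement of Prog/Jsmn/S/ParseInv.lean. -/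
theorem close_spec (sf : SafeFacts binS.cfg) (n : User.Layout) : CloseSpec n := fun _ _ _ _ _ _ hch hc hsome => close_reach sf hch hc hsome

end S
end J6
end X86
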